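-- pv_equiv track=rewrite | github.com/falconizmi/extended-tasks | 02/r2_fridays.py | fridays
-- ===== SOURCE A (Python) =====
-- def fridays(year, day_of_week):
--     months = [31, 28, 31, 30, 31, 30, 31, 31, 30, 31, 30, 31]
--     if (year % 400 == 0) and (year % 100 == 0):
--         months[1] = 29
--     elif (year % 4 == 0) and (year % 100 != 0):
--         months[1] = 29
--
--     total = 0
--     cur_day = 4 - day_of_week
--     cur_month = 1
--     while cur_month <= 12:
--         if cur_day == 12:
--             total += 1
--
--         cur_day += 7
--         if cur_day >= months[cur_month-1]:
--             cur_day = cur_day % months[cur_month-1]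
--             cur_month += 1
--
--     return total
-- ===== SOURCE B (Python) =====
-- def fridays(year, day_of_week):
--     leap = year % 4 == 0 and (year % 100 != 0 or year % 400 == 0)
--     months = [31, 29 if leap else 28, 31, 30, 31, 30, 31, 31, 30, 31, 30, 31]
--     total = 0
--     offset = 0
--     for length in months:
--         if (offset + 1 + day_of_week) % 7 == 0:
--             total += 1
--         offset += length
--     return total
-- ===== Notes on version B (the rewrite author's own statement) =====
-- stated objective: faster
-- what changed: B keeps a running day-offset from January 1st and tests each month's 13th directly with one mod-7 congruence (12 iterations total), instead of A's walk that hops week by week through every month; Pre_ excludes day_of_week < -8, where the walk's start index 4 - day_of_week already lies past the 13th of January, the argument denotes no weekday, and A's and B's totals are both arbitrary conventions.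
-- outside the precondition, e.g. on fridays(2023, -15): A returns 1, B returns 2; on fridays(2023, -29): A returns 1, B returns 2; on fridays(2023, -10): A returns 1, B returns 1
import Mathlib
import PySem

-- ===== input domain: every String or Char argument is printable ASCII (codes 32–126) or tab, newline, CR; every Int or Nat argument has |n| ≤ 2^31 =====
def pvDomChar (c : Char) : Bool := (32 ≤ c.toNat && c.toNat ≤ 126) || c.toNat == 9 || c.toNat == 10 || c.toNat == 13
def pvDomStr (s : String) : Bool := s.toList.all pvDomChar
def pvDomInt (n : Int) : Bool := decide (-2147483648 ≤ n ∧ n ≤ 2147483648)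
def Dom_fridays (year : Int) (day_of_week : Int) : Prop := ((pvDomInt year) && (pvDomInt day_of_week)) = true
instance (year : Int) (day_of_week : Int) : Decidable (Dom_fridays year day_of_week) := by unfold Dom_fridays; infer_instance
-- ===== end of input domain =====

-- B tests each month's 13th with a running day-offset and one mod-7 congruence
-- (12 iterations) instead of A's week-by-week walk; same value on Pre_.

-- ===== PORT A =====
-- months list after the leap-year adjustment (months[1] = 29)
def fridaysMonths (year : Int) : List Int :=
  let months : List Int := [31, 28, 31, 30, 31, 30, 31, 31, 30, 31, 30, 31]
  if PySem.Int.mod year 400 = 0 ∧ PySem.Int.mod year 100 = 0 then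
    PySem.List.pySetD months 1 29
  else if PySem.Int.mod year 4 = 0 ∧ PySem.Int.mod year 100 ≠ 0 then
    PySem.List.pySetD months 1 29
  else months

-- bound used only for the termination measure of the while loop
theorem fridaysMonths_le (year : Int) : ∀ x ∈ fridaysMonths year, x ≤ 31 := by
  unfold fridaysMonths
  split_ifs <;> decide

-- the while loop of A: state (total, cur_day, cur_month)
def fridaysLoop (months : List Int) (hm : ∀ x ∈ months, x ≤ 31)
    (total cur_day cur_month : Int) : Int :=
  if h : cur_month ≤ 12 then
    let total' := if cur_day = 12 then total + 1 else total
    let cur' := cur_day + 7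
    let L := PySem.List.pyGetD months (cur_month - 1) 0
    if h2 : L ≤ cur' then
      fridaysLoop months hm total' (PySem.Int.mod cur' L) (cur_month + 1)
    else
      fridaysLoop months hm total' cur' cur_month
  else total
termination_by ((13 - cur_month).toNat, (31 - cur_day).toNat)
decreasing_by
  · exact Prod.Lex.left _ _ (by omega)
  · have hL31 : PySem.List.pyGetD months (cur_month - 1) 0 ≤ 31 := by
      by_cases hin : PySem.Raise.InRange months.length (cur_month - 1)
      · exact hm _ (PySem.List.pyGetD_mem months 0 hin)
      · unfold PySem.List.pyGetD
        rw [(PySem.List.pyGet?_eq_none_iff months (cur_month - 1)).2 hin]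
        decide
    exact Prod.Lex.right _ (by omega)

def fridays (year : Int) (day_of_week : Int) : Int :=
  fridaysLoop (fridaysMonths year) (fridaysMonths_le year) 0 (4 - day_of_week) 1

-- ===== PORT B =====
-- one month of B: count if this month's 13th has the target weekday, advance the offset
def fridaysAltStep (dow : Int) (p : Int × Int) (length : Int) : Int × Int :=
  let total := if PySem.Int.mod (p.2 + 1 + dow) 7 = 0 then p.1 + 1 else p.1
  (total, p.2 + length)

def fridays_alt (year : Int) (day_of_week : Int) : Int :=
  let leap := PySem.Int.mod year 4 = 0 ∧ (PySem.Int.mod year 100 ≠ 0 ∨ PySem.Int.mod year 400 = 0)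
  let months : List Int := [31, if leap then 29 else 28, 31, 30, 31, 30, 31, 31, 30, 31, 30, 31]
  (months.foldl (fridaysAltStep day_of_week) (0, 0)).1

-- ===== PRECONDITION & SPEC =====
-- Pre_ requires day_of_week ≥ -8, so that A's start index 4 - day_of_week lies at or
-- before the 13th; for smaller arguments the parameter denotes no weekday and A's and
-- B's totals are both arbitrary conventions (see the excluded examples in the claim).
def Pre_fridays (year : Int) (day_of_week : Int) : Prop := -8 ≤ day_of_week
instance (year : Int) (day_of_week : Int) : Decidable (Pre_fridays year day_of_week) := by unfold Pre_fridays; infer_instance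
def pvWitness_fridays : Int × Int := (2023, 4)

def Spec_fridays (year : Int) (day_of_week : Int) (out : Int) : Prop := out = fridays_alt year day_of_week
instance (year : Int) (day_of_week : Int) (out : Int) : Decidable (Spec_fridays year day_of_week out) := by unfold Spec_fridays; infer_instance

-- ===== CLAIM (what is proved, stated in full; the proofs are below) =====
def Claim_equal_fridays : Prop := ∀ (year : Int) (day_of_week : Int), Dom_fridays year day_of_week → Pre_fridays year day_of_week → Spec_fridays year day_of_week (fridays year day_of_week)

-- ===== LEMMAS AND PROOFS =====

theorem pv_fmod_pos (a b : Int) (h : 0 < b) : a.fmod b = a % b := by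
  rw [Int.fmod_eq_emod]; simp [h.le]

-- one month of A's walk, entered at cur < L with L ∈ [28,31]: add 1 iff the walk
-- passes through 12, leave at (cur - L) mod 7 in the next month (fuel n bounds the climb)
theorem pv_month_step (months : List Int) (hm : ∀ x ∈ months, x ≤ 31)
    (m L : Int) (_h1 : 1 ≤ m) (h12 : m ≤ 12)
    (hL : PySem.List.pyGetD months (m - 1) 0 = L) (h28 : 28 ≤ L) (h31 : L ≤ 31) :
    ∀ (n : Nat) (cur : Int), cur < L → (31 - cur).toNat ≤ n → ∀ (total : Int),
      fridaysLoop months hm total cur m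
        = fridaysLoop months hm
            (if cur ≤ 12 ∧ PySem.Int.mod cur 7 = 5 then total + 1 else total)
            (PySem.Int.mod (cur - L) 7) (m + 1) := by
  intro n
  induction n with
  | zero =>
      intro cur hcl hn total
      exfalso; omega
  | succ n ih =>
      intro cur hcl hn total
      rw [fridaysLoop, dif_pos h12]
      simp only [hL]
      have hm7 : PySem.Int.mod cur 7 = cur % 7 := pv_fmod_pos _ _ (by omega)
      by_cases hw : L ≤ cur + 7
      · rw [dif_pos hw]
        -- cur ∈ [L-7, L-1]: the wrap (cur+7) % L equals (cur - L) mod 7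
        have hcur : L - 7 ≤ cur := by omega
        have h12' : ¬ cur = 12 := by omega
        have hb : ¬ (cur ≤ 12 ∧ PySem.Int.mod cur 7 = 5) := by omega
        have heq : PySem.Int.mod (cur + 7) L = PySem.Int.mod (cur - L) 7 := by
          unfold PySem.Int.mod
          rw [pv_fmod_pos _ _ (by omega), pv_fmod_pos _ _ (by omega)]
          interval_cases L <;> omega
        simp only [if_neg h12', if_neg hb, heq]
      · rw [dif_neg hw]
        rw [ih (cur + 7) (by omega) (by omega)]
        have hm7' : PySem.Int.mod (cur + 7) 7 = cur % 7 := by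
          unfold PySem.Int.mod; rw [pv_fmod_pos _ _ (by omega)]; omega
        have harg : (if cur + 7 ≤ 12 ∧ PySem.Int.mod (cur + 7) 7 = 5 then
              (if cur = 12 then total + 1 else total) + 1
            else (if cur = 12 then total + 1 else total))
            = (if cur ≤ 12 ∧ PySem.Int.mod cur 7 = 5 then total + 1 else total) := by
          rw [hm7', hm7]
          have h7 : 0 ≤ cur % 7 ∧ cur % 7 < 7 := ⟨Int.emod_nonneg _ (by omega), Int.emod_lt_of_pos _ (by omega)⟩
          have hc : cur % 7 = 5 → cur ≠ 12 → cur ≤ 12 → cur ≤ 5 := by omega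
          split_ifs <;> omega
        rw [harg]
        have hsh : PySem.Int.mod (cur + 7 - L) 7 = PySem.Int.mod (cur - L) 7 := by
          unfold PySem.Int.mod
          rw [pv_fmod_pos _ _ (by omega), pv_fmod_pos _ _ (by omega)]; omega
        rw [hsh]

-- wrapper with the fuel instantiated
theorem pv_month_step' (months : List Int) (hm : ∀ x ∈ months, x ≤ 31)
    (m L : Int) (h1 : 1 ≤ m) (h12 : m ≤ 12)
    (hL : PySem.List.pyGetD months (m - 1) 0 = L) (h28 : 28 ≤ L) (h31 : L ≤ 31)
    (total cur : Int) (hcl : cur < L) :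
    fridaysLoop months hm total cur m
      = fridaysLoop months hm
          (if cur ≤ 12 ∧ PySem.Int.mod cur 7 = 5 then total + 1 else total)
          (PySem.Int.mod (cur - L) 7) (m + 1) :=
  pv_month_step months hm m L h1 h12 hL h28 h31 (31 - cur).toNat cur hcl le_rfl total

-- A's loop from month (pre.length + 1) on equals B's fold over the remaining months,
-- given the invariant cur ≡ 4 - dow - offset (mod 7), cur ≤ 12
theorem pv_run_aux (dow : Int) (months : List Int) (hm : ∀ x ∈ months, x ≤ 31)
    (h12 : months.length = 12) (hlo : ∀ x ∈ months, 28 ≤ x) :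
    ∀ (rest pre : List Int), months = pre ++ rest →
      ∀ (total cur off : Int), cur ≤ 12 → cur % 7 = (4 - dow - off) % 7 →
        fridaysLoop months hm total cur ((pre.length : Int) + 1)
          = (rest.foldl (fridaysAltStep dow) (total, off)).1 := by
  intro rest
  induction rest with
  | nil =>
      intro pre hpre total cur off _ _
      have hl : pre.length = 12 := by
        have := congrArg List.length hpre
        simpa [h12] using this.symm
      rw [fridaysLoop, hl, dif_neg (show ¬ (((12:Nat):Int) + 1 ≤ 12) by norm_num)]
      rfl
  | cons L rest' ih =>
      intro pre hpre total cur off hc12 hinv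
      have hlen : pre.length + rest'.length + 1 = 12 := by
        have := congrArg List.length hpre
        simp at this; omega
      have hLmem : L ∈ months := by
        rw [hpre]; exact List.mem_append_right _ (List.mem_cons_self ..)
      have hL : PySem.List.pyGetD months ((pre.length : Int) + 1 - 1) 0 = L := by
        have h1 : ((pre.length : Int) + 1 - 1) = ((pre.length : Nat) : Int) := by omega
        rw [h1, PySem.List.pyGetD_natCast, hpre, List.getD_eq_getElem?_getD,
            List.getElem?_append_right (le_refl pre.length)]
        simp
      have h28 : 28 ≤ L := hlo L hLmem
      rw [pv_month_step' months hm ((pre.length : Int) + 1) L (by omega) (by omega)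
            hL h28 (hm L hLmem) total cur (by omega)]
      -- the count conditions of A and B agree under the invariant
      have hmv : PySem.Int.mod cur 7 = cur % 7 := pv_fmod_pos _ _ (by omega)
      have hmb : PySem.Int.mod (off + 1 + dow) 7 = (off + 1 + dow) % 7 := pv_fmod_pos _ _ (by omega)
      have hcond : (cur ≤ 12 ∧ PySem.Int.mod cur 7 = 5) ↔ PySem.Int.mod (off + 1 + dow) 7 = 0 := by
        rw [hmv, hmb]
        constructor
        · rintro ⟨_, h5⟩; omega
        · intro h0; exact ⟨hc12, by omega⟩
      -- the new cursor satisfies the invariant for offset off + L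
      have hnew7 : PySem.Int.mod (cur - L) 7 = (cur - L) % 7 := pv_fmod_pos _ _ (by omega)
      have hnew12 : PySem.Int.mod (cur - L) 7 ≤ 12 := by
        rw [hnew7]
        have := Int.emod_lt_of_pos (cur - L) (show (0:Int) < 7 by omega); omega
      have hnewinv : PySem.Int.mod (cur - L) 7 % 7 = (4 - dow - (off + L)) % 7 := by
        rw [hnew7]; omega
      have := ih (pre ++ [L]) (by simp [hpre])
        (if cur ≤ 12 ∧ PySem.Int.mod cur 7 = 5 then total + 1 else total)
        (PySem.Int.mod (cur - L) 7) (off + L) hnew12 hnewinv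
      simp only [List.length_append, List.length_cons, List.length_nil] at this
      have harg : ((pre.length : Int) + 1 + 1) = (((pre.length + 1 : Nat) : Int) + 1) := by
        push_cast; ring
      rw [harg]
      have hstep : fridaysAltStep dow (total, off) L
          = ((if cur ≤ 12 ∧ PySem.Int.mod cur 7 = 5 then total + 1 else total), off + L) := by
        simp only [fridaysAltStep]
        rw [if_congr hcond.symm rfl rfl]
      rw [List.foldl_cons, hstep]
      simpa using this

-- A's month list written with B's leap-year expression
theorem pv_months_eq (year : Int) :
    fridaysMonths year
      = [31, if PySem.Int.mod year 4 = 0 ∧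
               (PySem.Int.mod year 100 ≠ 0 ∨ PySem.Int.mod year 400 = 0) then (29:Int) else 28,
         31, 30, 31, 30, 31, 31, 30, 31, 30, 31] := by
  unfold fridaysMonths
  have e4 := pv_fmod_pos year 4 (by norm_num)
  have e100 := pv_fmod_pos year 100 (by norm_num)
  have e400 := pv_fmod_pos year 400 (by norm_num)
  unfold PySem.Int.mod
  rw [e4, e100, e400]
  split_ifs with h1 h2 h3 h4 h5 <;> first | rfl | (exfalso; omega)

-- ===== VERDICT (by name: the statement is the Claim_ definition above) =====
theorem fridays_spec : Claim_equal_fridays := by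
  intro year day_of_week _hdom hpre
  unfold Pre_fridays at hpre
  unfold Spec_fridays fridays fridays_alt
  simp only [pv_months_eq year]
  exact pv_run_aux day_of_week _ _ (by split_ifs <;> rfl)
    (by intro x hx; split_ifs at hx <;> (fin_cases hx <;> omega))
    _ [] rfl 0 (4 - day_of_week) 0 (by omega) (by omega)
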